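-- pv_equiv track=rewrite | github.com/Flecart/prosocial-agents | external/gt-harmbench/eval/plots/data/processor.py | match_action_to_canonical
-- ===== SOURCE A (Python) =====
-- from typing import Any, List, Optional, Sequence, Tuple
--
-- def match_action_to_canonical(
--     parsed_action: Optional[str],
--     canonical_actions: Sequence[str],
-- ) -> Optional[str]:
--     """Match a parsed action string to a canonical action using fuzzy matching."""
--     if not parsed_action or not canonical_actions:
--         return None
--
--     parsed_lower = parsed_action.lower()
--
--     # Prefer exact (case-insensitive) matches
--     for action in canonical_actions:
--         if action.lower() == parsed_lower:
--             return action
--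
--     # Fallback: substring matches
--     for action in canonical_actions:
--         a_low = action.lower()
--         if parsed_lower in a_low or a_low in parsed_lower:
--             return action
--
--     return None
-- ===== SOURCE B (Python) =====
-- def match_action_to_canonical(parsed_action, canonical_actions):
--     if not parsed_action or not canonical_actions:
--         return None
--
--     parsed_lower = parsed_action.lower()
--     fallback = None
--     for action in canonical_actions:
--         a_low = action.lower()
--         if a_low == parsed_lower:
--             return action
--         if fallback is None and (parsed_lower in a_low or a_low in parsed_lower):
--             fallback = action
--     return fallback
-- ===== Notes on version B (the rewrite author's own statement) =====
-- stated objective: simpler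
-- what changed: Replaces A's two sequential scans (exact-match pass, then substring pass) with one single pass that returns an exact match immediately and remembers only the first substring candidate in a fallback variable.
import Mathlib
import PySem

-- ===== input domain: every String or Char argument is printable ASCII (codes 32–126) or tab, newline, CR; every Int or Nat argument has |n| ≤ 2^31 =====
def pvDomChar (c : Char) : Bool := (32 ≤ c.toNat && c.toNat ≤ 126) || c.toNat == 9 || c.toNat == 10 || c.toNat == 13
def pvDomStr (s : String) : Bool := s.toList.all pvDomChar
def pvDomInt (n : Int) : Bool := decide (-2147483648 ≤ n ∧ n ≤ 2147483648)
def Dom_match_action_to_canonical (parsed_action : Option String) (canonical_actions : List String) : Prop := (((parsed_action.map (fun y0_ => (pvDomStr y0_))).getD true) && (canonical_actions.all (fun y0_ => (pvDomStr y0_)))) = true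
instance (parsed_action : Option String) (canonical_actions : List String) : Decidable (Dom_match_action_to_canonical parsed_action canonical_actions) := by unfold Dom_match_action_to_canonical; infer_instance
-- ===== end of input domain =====

-- B replaces A's two sequential scans by one single pass with a fallback variable (objective: simpler).

-- ===== PORT A =====
def match_action_to_canonical (parsed_action : Option String) (canonical_actions : List String) : Option String :=
  match parsed_action with
  | none => none
  | some pa =>
    if pa = "" ∨ canonical_actions = [] then none
    else
      let parsed_lower := PySem.Str.lower pa
      -- first loop: exact (case-insensitive) match, early return
      match canonical_actions.find? (fun action => PySem.Str.lower action == parsed_lower) with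
      | some action => some action
      | none =>
        -- second loop: substring match, early return; falls through to None
        canonical_actions.find? (fun action =>
          PySem.Str.isIn parsed_lower (PySem.Str.lower action) ||
          PySem.Str.isIn (PySem.Str.lower action) parsed_lower)

-- ===== PORT B =====
-- single pass: return on exact match, remember first substring candidate in `fallback`
def matchAltLoop (parsed_lower : String) : List String → Option String → Option String
  | [], fallback => fallback
  | action :: rest, fallback =>
    let a_low := PySem.Str.lower action
    if a_low == parsed_lower then some action
    else if fallback.isNone &&
        (PySem.Str.isIn parsed_lower a_low || PySem.Str.isIn a_low parsed_lower) then
      matchAltLoop parsed_lower rest (some action)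
    else
      matchAltLoop parsed_lower rest fallback

def match_action_to_canonical_alt (parsed_action : Option String) (canonical_actions : List String) : Option String :=
  match parsed_action with
  | none => none
  | some pa =>
    if pa = "" ∨ canonical_actions = [] then none
    else matchAltLoop (PySem.Str.lower pa) canonical_actions none

-- ===== PRECONDITION & SPEC =====
def Spec_match_action_to_canonical (parsed_action : Option String) (canonical_actions : List String) (out : Option String) : Prop := out = match_action_to_canonical_alt parsed_action canonical_actions
instance (parsed_action : Option String) (canonical_actions : List String) (out : Option String) : Decidable (Spec_match_action_to_canonical parsed_action canonical_actions out) := by unfold Spec_match_action_to_canonical; infer_instance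

-- ===== CLAIM (what is proved, stated in full; the proofs are below) =====
def Claim_equal_match_action_to_canonical : Prop := ∀ (parsed_action : Option String) (canonical_actions : List String), Dom_match_action_to_canonical parsed_action canonical_actions → Spec_match_action_to_canonical parsed_action canonical_actions (match_action_to_canonical parsed_action canonical_actions)

-- ===== LEMMAS AND PROOFS =====

-- the one-pass loop equals: first exact match, else the stored fallback, else the first substring match
lemma matchAltLoop_eq (pl : String) (xs : List String) (fb : Option String) :
    matchAltLoop pl xs fb =
      match xs.find? (fun action => PySem.Str.lower action == pl) with
      | some action => some action
      | none =>
        fb.or (xs.find? (fun action =>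
          PySem.Str.isIn pl (PySem.Str.lower action) ||
          PySem.Str.isIn (PySem.Str.lower action) pl)) := by
  induction xs generalizing fb with
  | nil => simp [matchAltLoop]
  | cons a rest ih =>
    by_cases hex : (PySem.Str.lower a == pl) = true
    · simp [matchAltLoop, List.find?, hex]
    · by_cases hsub : (PySem.Str.isIn pl (PySem.Str.lower a) ||
          PySem.Str.isIn (PySem.Str.lower a) pl) = true
      · cases fb with
        | none =>
          simp only [matchAltLoop, List.find?, hex, hsub]
          simp [ih]
        | some b =>
          simp only [matchAltLoop, List.find?, hex, hsub]
          simp [ih]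
      · simp only [matchAltLoop, List.find?, hex, hsub]
        simp [ih]

-- ===== VERDICT (by name: the statement is the Claim_ definition above) =====
theorem match_action_to_canonical_spec : Claim_equal_match_action_to_canonical := by
  intro parsed_action canonical_actions _
  unfold Spec_match_action_to_canonical
  cases parsed_action with
  | none => rfl
  | some pa =>
    simp only [match_action_to_canonical, match_action_to_canonical_alt]
    split
    · rfl
    · rw [matchAltLoop_eq]
      simp
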